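-- pv_equiv track=rewrite | github.com/DrunkCodes/Yelp-Lead-Gen | app/services/email_extractor.py | prioritize_emails
-- ===== SOURCE A (Python) =====
-- from typing import Dict, List, Optional, Set, Tuple, Union
--
-- NON_CONTACT_EMAILS = {
--     'noreply', 'no-reply', 'donotreply', 'do-not-reply', 'no_reply',
--     'info', 'admin', 'administrator', 'webmaster', 'hostmaster',
--     'postmaster', 'abuse', 'spam', 'support', 'help', 'sales',
--     'marketing', 'privacy', 'legal', 'billing', 'accounts',
--     'example', 'test', 'user', 'username', 'email', 'mail'
-- }
--
-- def is_likely_contact_email(email: str) -> bool: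
--     """
--     Check if an email is likely to be a contact email (not a generic service email).
--
--     Args:
--         email: Email address to check
--
--     Returns:
--         True if the email is likely a contact email, False otherwise
--     """
--     if not email or '@' not in email:
--         return False
--
--     # Extract local part (before @)
--     local_part = email.split('@')[0].lower()
--
--     # Check if local part contains common non-contact patterns
--     for pattern in NON_CONTACT_EMAILS:
--         if pattern == local_part:
--             return False
--
--     # Prefer emails with names (john.doe@example.com)
--     if '.' in local_part and len(local_part) > 5:
--         return True
--
--     # Avoid very short local parts
--     if len(local_part) < 3:
--         return False
--
--     return True
--
-- def prioritize_emails(emails: List[str]) -> List[str]: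
--     """
--     Sort emails by likelihood of being a contact email.
--
--     Args:
--         emails: List of email addresses
--
--     Returns:
--         Sorted list of email addresses, with most likely contact emails first
--     """
--     if not emails:
--         return []
--
--     # Define priority tiers
--     contact_emails = []
--     likely_emails = []
--     other_emails = []
--
--     for email in emails:
--         # Skip invalid emails
--         if not email or '@' not in email:
--             continue
--
--         local_part = email.split('@')[0].lower()
--
--         # Highest priority: Emails with common contact patterns
--         if any(pattern in local_part for pattern in ['contact', 'inquiry', 'hello', 'info']):
--             contact_emails.append(email)
--         # Medium priority: Emails that look like personal emails (with dots, longer)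
--         elif is_likely_contact_email(email):
--             likely_emails.append(email)
--         # Lowest priority: All other valid emails
--         else:
--             other_emails.append(email)
--
--     # Combine the tiers in priority order
--     return contact_emails + likely_emails + other_emails
-- ===== SOURCE B (Python) =====
-- NON_CONTACT_EMAILS = {
--     'noreply', 'no-reply', 'donotreply', 'do-not-reply', 'no_reply',
--     'info', 'admin', 'administrator', 'webmaster', 'hostmaster',
--     'postmaster', 'abuse', 'spam', 'support', 'help', 'sales',
--     'marketing', 'privacy', 'legal', 'billing', 'accounts',
--     'example', 'test', 'user', 'username', 'email', 'mail'
-- }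
--
-- CONTACT_PATTERNS = ('contact', 'inquiry', 'hello', 'info')
--
--
-- def is_likely_contact_email(email: str) -> bool:
--     if not email or '@' not in email:
--         return False
--     local_part = email.split('@')[0].lower()
--     for pattern in NON_CONTACT_EMAILS:
--         if pattern == local_part:
--             return False
--     if '.' in local_part and len(local_part) > 5:
--         return True
--     if len(local_part) < 3:
--         return False
--     return True
--
--
-- def _tier(email: str) -> int:
--     local_part = email.split('@')[0].lower()
--     if any(p in local_part for p in CONTACT_PATTERNS):
--         return 0
--     if is_likely_contact_email(email):
--         return 1
--     return 2
--
--
-- def prioritize_emails(emails):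
--     return sorted((e for e in emails if e and '@' in e), key=_tier)
-- ===== Notes on version B (the rewrite author's own statement) =====
-- stated objective: idiomatic
-- what changed: Replaces the three explicit accumulator lists and final concatenation with one stable sorted() call over the filtered valid emails, keyed by a tier function (0 contact-pattern, 1 likely-contact, 2 other), relying on sort stability for within-tier order.
import Mathlib
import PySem

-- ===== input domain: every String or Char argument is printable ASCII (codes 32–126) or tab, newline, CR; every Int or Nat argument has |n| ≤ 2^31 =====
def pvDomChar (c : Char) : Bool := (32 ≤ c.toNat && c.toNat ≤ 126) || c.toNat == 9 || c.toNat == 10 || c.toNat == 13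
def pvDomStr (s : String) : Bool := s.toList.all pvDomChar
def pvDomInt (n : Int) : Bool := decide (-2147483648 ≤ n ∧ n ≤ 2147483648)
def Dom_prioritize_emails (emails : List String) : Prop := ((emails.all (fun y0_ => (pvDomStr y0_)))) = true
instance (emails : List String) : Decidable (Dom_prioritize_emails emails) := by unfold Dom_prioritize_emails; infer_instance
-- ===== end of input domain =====

-- B replaces A's three append-accumulator lists with a single stable sort of the
-- valid emails under a 0/1/2 tier key (idiomatic; same results, not claimed faster).

-- ===== PORT A =====
def nonContactEmails : List String :=
  ["noreply", "no-reply", "donotreply", "do-not-reply", "no_reply",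
   "info", "admin", "administrator", "webmaster", "hostmaster",
   "postmaster", "abuse", "spam", "support", "help", "sales",
   "marketing", "privacy", "legal", "billing", "accounts",
   "example", "test", "user", "username", "email", "mail"]

-- email.split('@')[0].lower()  (the index 0 is total: split always returns a nonempty list)
def localPart (email : String) : String :=
  PySem.Str.lower (PySem.List.pyGetD ((PySem.Str.split? email "@").getD []) 0 "")

def is_likely_contact_email (email : String) : Bool :=
  if email == "" || !PySem.Str.isIn "@" email then false
  else
    let lp := localPart email
    -- iterating the Python set only for an equality test = membership, order-independent
    if nonContactEmails.any (fun p => p == lp) then false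
    else if PySem.Str.isIn "." lp && PySem.Str.len lp > 5 then true
    else if PySem.Str.len lp < 3 then false
    else true

-- loop body of A's for-loop (state: the three bucket lists)
def stepA (s : List String × List String × List String) (email : String) :
    List String × List String × List String :=
  if email == "" || !PySem.Str.isIn "@" email then s
  else
    if ["contact", "inquiry", "hello", "info"].any (fun p => PySem.Str.isIn p (localPart email)) then
      (s.1 ++ [email], s.2.1, s.2.2)
    else if is_likely_contact_email email then
      (s.1, s.2.1 ++ [email], s.2.2)
    else
      (s.1, s.2.1, s.2.2 ++ [email])

def prioritize_emails (emails : List String) : List String :=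
  if emails == [] then []
  else
    let r := emails.foldl stepA ([], [], [])
    r.1 ++ r.2.1 ++ r.2.2

-- ===== PORT B =====
def contactPatterns : List String := ["contact", "inquiry", "hello", "info"]

def tier (email : String) : Nat :=
  if contactPatterns.any (fun p => PySem.Str.isIn p (localPart email)) then 0
  else if is_likely_contact_email email then 1
  else 2

-- 'e and '@' in e'
def validEmail (e : String) : Bool := !(e == "") && PySem.Str.isIn "@" e

def prioritize_emails_alt (emails : List String) : List String :=
  PySem.List.sorted (emails.filter validEmail) tier

-- ===== PRECONDITION & SPEC =====
def Spec_prioritize_emails (emails : List String) (out : List String) : Prop := out = prioritize_emails_alt emails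
instance (emails : List String) (out : List String) : Decidable (Spec_prioritize_emails emails out) := by unfold Spec_prioritize_emails; infer_instance

-- ===== CLAIM (what is proved, stated in full; the proofs are below) =====
def Claim_equal_prioritize_emails : Prop := ∀ (emails : List String), Dom_prioritize_emails emails → Spec_prioritize_emails emails (prioritize_emails emails)

-- ===== LEMMAS AND PROOFS =====

lemma tier_cases (e : String) : tier e = 0 ∨ tier e = 1 ∨ tier e = 2 := by
  unfold tier; split_ifs <;> simp

lemma insertBy_all_before {α : Type} (before : α → α → Bool) (x : α) (bs : List α)
    (h : ∀ y ∈ bs, before x y = true) : PySem.List.insertBy before x bs = x :: bs := by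
  cases bs with
  | nil => rfl
  | cons b t => simp [PySem.List.insertBy, h b (by simp)]

lemma insertBy_append_none {α : Type} (before : α → α → Bool) (x : α) (as bs : List α)
    (h : ∀ y ∈ as, before x y = false) :
    PySem.List.insertBy before x (as ++ bs) = as ++ PySem.List.insertBy before x bs := by
  induction as with
  | nil => simp
  | cons a t ih =>
    simp [PySem.List.insertBy, h a (by simp)]
    exact ih (fun y hy => h y (by simp [hy]))

lemma mem_tier_filter {xs : List String} {y : String} {i : Nat}
    (hy : y ∈ xs.filter (fun e => tier e == i)) : tier y = i := by
  have := (List.mem_filter.mp hy).2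
  simpa using this

lemma sorted_tier (xs : List String) :
    PySem.List.sorted xs tier =
      xs.filter (fun e => tier e == 0) ++ xs.filter (fun e => tier e == 1) ++
        xs.filter (fun e => tier e == 2) := by
  induction xs using List.reverseRecOn with
  | nil => rfl
  | append_singleton ys x ih =>
    rw [PySem.List.sorted_eq_foldl_insertBy] at ih ⊢
    rw [List.foldl_append, List.foldl_cons, List.foldl_nil, ih]
    simp only [List.filter_append, List.filter_cons, List.filter_nil]
    rcases tier_cases x with hx | hx | hx
    · rw [List.append_assoc,
        insertBy_append_none _ _ _ _
          (fun y hy => by simp [mem_tier_filter hy, hx]),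
        insertBy_all_before _ _ _
          (fun y hy => by
            rcases List.mem_append.mp hy with h1 | h2
            · simp [mem_tier_filter h1, hx]
            · simp [mem_tier_filter h2, hx])]
      simp [hx]
    · rw [insertBy_append_none _ _ _ _
          (fun y hy => by
            rcases List.mem_append.mp hy with h1 | h2
            · simp [mem_tier_filter h1, hx]
            · simp [mem_tier_filter h2, hx]),
        insertBy_all_before _ _ _
          (fun y hy => by simp [mem_tier_filter hy, hx])]
      simp [hx]
    · rw [PySem.List.insertBy_of_forall_not_before _ _ _
          (fun y hy => by
            rcases List.mem_append.mp hy with h1 | h2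
            · rcases List.mem_append.mp h1 with h3 | h4
              · simp [mem_tier_filter h3, hx]
              · simp [mem_tier_filter h4, hx]
            · simp [mem_tier_filter h2, hx])]
      simp [hx]

lemma skip_eq_not_valid (e : String) :
    (e == "" || !PySem.Str.isIn "@" e) = !validEmail e := by
  unfold validEmail
  cases heq : (e == "") <;> cases hin : PySem.Str.isIn "@" e <;> simp

lemma foldl_stepA (emails : List String) (c l o : List String) :
    emails.foldl stepA (c, l, o) =
      (c ++ (emails.filter validEmail).filter (fun e => tier e == 0),
       l ++ (emails.filter validEmail).filter (fun e => tier e == 1),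
       o ++ (emails.filter validEmail).filter (fun e => tier e == 2)) := by
  induction emails generalizing c l o with
  | nil => simp
  | cons e es ih =>
    rw [List.foldl_cons]
    by_cases hv : validEmail e = true
    · have hskip : (e == "" || !PySem.Str.isIn "@" e) = false := by
        rw [skip_eq_not_valid, hv]; rfl
      by_cases hC : (["contact", "inquiry", "hello", "info"].any
          (fun p => PySem.Str.isIn p (localPart e))) = true
      · have ht : tier e = 0 := by unfold tier contactPatterns; rw [if_pos hC]
        simp only [stepA, hskip, Bool.false_eq_true, if_false, hC, if_true]
        rw [ih]
        simp [hv, ht]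
      · by_cases hL : is_likely_contact_email e = true
        · have ht : tier e = 1 := by unfold tier contactPatterns; rw [if_neg hC, if_pos hL]
          simp only [stepA, hskip, Bool.false_eq_true, if_false, hC, hL, if_true]
          rw [ih]
          simp [hv, ht]
        · have ht : tier e = 2 := by unfold tier contactPatterns; rw [if_neg hC, if_neg hL]
          simp only [stepA, hskip, Bool.false_eq_true, if_false, hC, hL]
          rw [ih]
          simp [hv, ht]
    · have hskip : (e == "" || !PySem.Str.isIn "@" e) = true := by
        rw [skip_eq_not_valid]; simp [hv]
      simp only [stepA, hskip, if_true]
      rw [ih]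
      simp [hv]

-- ===== VERDICT (by name: the statement is the Claim_ definition above) =====
theorem prioritize_emails_spec : Claim_equal_prioritize_emails := by
  intro emails _
  unfold Spec_prioritize_emails prioritize_emails prioritize_emails_alt
  rw [sorted_tier]
  by_cases h : emails = []
  · subst h; simp
  · simp only [h, beq_iff_eq, if_false]
    rw [foldl_stepA]
    simp
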